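-- pv_equiv track=rewrite | github.com/elipaulman/CodePath_Practice_Problems | Session1/prob3.py | tiggerfy
-- ===== SOURCE A (Python) =====
-- def tiggerfy(word):
--     result = ""
--     i = 0
--     while i < len(word):
--         if word[i].lower() == 't':
--             i += 1
--         elif word[i].lower() == 'i':
--             i += 1
--         elif i + 1 < len(word) and word[i:i+2].lower() == 'gg':
--             i += 2
--         elif i + 1 < len(word) and word[i:i+2].lower() == 'er':
--             i += 2
--         else:
--             result += word[i]
--             i += 1
--     return result
-- ===== SOURCE B (Python) =====
-- def tiggerfy(word):
--     # One pass over the characters with a one-character "pending" state (a held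
--     # character that may start a two-character pattern), instead of an index/slice loop.
--     out = []
--     pending = None
--     for c in word:
--         lc = c.lower()
--         if pending is not None:
--             p, pending = pending, None
--             if (p.lower() == 'g' and lc == 'g') or (p.lower() == 'e' and lc == 'r'):
--                 continue
--             out.append(p)
--         if lc in ('t', 'i'):
--             continue
--         if lc in ('g', 'e'):
--             pending = c
--         else:
--             out.append(c)
--     if pending is not None:
--         out.append(pending)
--     return ''.join(out)
-- ===== Notes on version B (the rewrite author's own statement) =====
-- stated objective: faster
-- what changed: Replaces the index-based while loop with its per-step two-character slices and quadratic string concatenation by a single for-loop state machine over the characters that holds at most one pending pattern-starting character and accumulates output in a list.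
import Mathlib
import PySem

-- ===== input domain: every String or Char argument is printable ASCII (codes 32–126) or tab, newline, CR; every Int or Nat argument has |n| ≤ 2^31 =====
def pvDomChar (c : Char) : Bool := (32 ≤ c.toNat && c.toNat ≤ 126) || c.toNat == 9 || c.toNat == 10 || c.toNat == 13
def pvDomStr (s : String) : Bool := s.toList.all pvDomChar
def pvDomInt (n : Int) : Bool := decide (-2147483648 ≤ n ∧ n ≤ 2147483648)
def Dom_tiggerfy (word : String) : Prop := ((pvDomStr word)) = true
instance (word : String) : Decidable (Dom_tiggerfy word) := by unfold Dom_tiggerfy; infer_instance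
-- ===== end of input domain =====

-- B replaces A's index/slice while-loop (with quadratic string concatenation) by a single-pass state machine holding at most one pending pattern-starting character (objective: faster, measured).

-- ===== PORT A =====
-- A's while loop: index i, accumulator result; branches in A's order.
def tiggerfyGo (cs : List Char) (i : Nat) (result : List Char) : List Char :=
  if h : i < cs.length then
    if PySem.Chars.lowerChar cs[i] = 't' then
      tiggerfyGo cs (i + 1) result
    else if PySem.Chars.lowerChar cs[i] = 'i' then
      tiggerfyGo cs (i + 1) result
    else if i + 1 < cs.length ∧
        PySem.Chars.lower (PySem.List.slice cs (some (i : Int)) (some ((i : Int) + 2))) = ['g', 'g'] then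
      tiggerfyGo cs (i + 2) result
    else if i + 1 < cs.length ∧
        PySem.Chars.lower (PySem.List.slice cs (some (i : Int)) (some ((i : Int) + 2))) = ['e', 'r'] then
      tiggerfyGo cs (i + 2) result
    else
      tiggerfyGo cs (i + 1) (result ++ [cs[i]])
  else result
termination_by cs.length - i

def tiggerfy (word : String) : String :=
  String.ofList (tiggerfyGo word.toList 0 [])

-- ===== PORT B =====
-- one step of B's for-loop: state = (out, pending)
def altStep (st : List Char × Option Char) (c : Char) : List Char × Option Char :=
  let lc := PySem.Chars.lowerChar c
  match st.2 with
  | some p =>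
    if (PySem.Chars.lowerChar p = 'g' ∧ lc = 'g') ∨ (PySem.Chars.lowerChar p = 'e' ∧ lc = 'r') then
      (st.1, none)
    else
      let out := st.1 ++ [p]
      if lc = 't' ∨ lc = 'i' then (out, none)
      else if lc = 'g' ∨ lc = 'e' then (out, some c)
      else (out ++ [c], none)
  | none =>
    if lc = 't' ∨ lc = 'i' then (st.1, none)
    else if lc = 'g' ∨ lc = 'e' then (st.1, some c)
    else (st.1 ++ [c], none)

-- the final flush of a still-pending character
def altFinish (st : List Char × Option Char) : List Char :=
  match st.2 with
  | some p => st.1 ++ [p]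
  | none => st.1

def tiggerfy_alt (word : String) : String :=
  String.ofList (altFinish (word.toList.foldl altStep ([], none)))

-- ===== PRECONDITION & SPEC =====
def Spec_tiggerfy (word : String) (out : String) : Prop := out = tiggerfy_alt word
instance (word : String) (out : String) : Decidable (Spec_tiggerfy word out) := by unfold Spec_tiggerfy; infer_instance

-- ===== CLAIM (what is proved, stated in full; the proofs are below) =====
def Claim_equal_tiggerfy : Prop := ∀ (word : String), Dom_tiggerfy word → Spec_tiggerfy word (tiggerfy word)

-- ===== LEMMAS AND PROOFS =====

-- reference recursion: A's branch decisions on the remaining character list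
def refA : List Char → List Char
  | [] => []
  | [c] => if PySem.Chars.lowerChar c = 't' ∨ PySem.Chars.lowerChar c = 'i' then [] else [c]
  | c1 :: c2 :: rest =>
    if PySem.Chars.lowerChar c1 = 't' ∨ PySem.Chars.lowerChar c1 = 'i' then refA (c2 :: rest)
    else if (PySem.Chars.lowerChar c1 = 'g' ∧ PySem.Chars.lowerChar c2 = 'g') ∨
            (PySem.Chars.lowerChar c1 = 'e' ∧ PySem.Chars.lowerChar c2 = 'r') then refA rest
    else c1 :: refA (c2 :: rest)

-- reference recursion for B: pending state made explicit
def refB : Option Char → List Char → List Char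
  | none, [] => []
  | some p, [] => [p]
  | none, c :: rest =>
    if PySem.Chars.lowerChar c = 't' ∨ PySem.Chars.lowerChar c = 'i' then refB none rest
    else if PySem.Chars.lowerChar c = 'g' ∨ PySem.Chars.lowerChar c = 'e' then refB (some c) rest
    else c :: refB none rest
  | some p, c :: rest =>
    if (PySem.Chars.lowerChar p = 'g' ∧ PySem.Chars.lowerChar c = 'g') ∨
       (PySem.Chars.lowerChar p = 'e' ∧ PySem.Chars.lowerChar c = 'r') then refB none rest
    else if PySem.Chars.lowerChar c = 't' ∨ PySem.Chars.lowerChar c = 'i' then p :: refB none rest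
    else if PySem.Chars.lowerChar c = 'g' ∨ PySem.Chars.lowerChar c = 'e' then p :: refB (some c) rest
    else p :: c :: refB none rest
termination_by _ l => l.length

theorem refA_cons2 (c1 c2 : Char) (rest : List Char) :
    refA (c1 :: c2 :: rest) =
      if PySem.Chars.lowerChar c1 = 't' ∨ PySem.Chars.lowerChar c1 = 'i' then refA (c2 :: rest)
      else if (PySem.Chars.lowerChar c1 = 'g' ∧ PySem.Chars.lowerChar c2 = 'g') ∨
              (PySem.Chars.lowerChar c1 = 'e' ∧ PySem.Chars.lowerChar c2 = 'r') then refA rest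
      else c1 :: refA (c2 :: rest) := by
  rw [refA]

theorem refB_none_cons (c : Char) (rest : List Char) :
    refB none (c :: rest) =
      if PySem.Chars.lowerChar c = 't' ∨ PySem.Chars.lowerChar c = 'i' then refB none rest
      else if PySem.Chars.lowerChar c = 'g' ∨ PySem.Chars.lowerChar c = 'e' then refB (some c) rest
      else c :: refB none rest := by
  rw [refB]

theorem refB_some_cons (p c : Char) (rest : List Char) :
    refB (some p) (c :: rest) =
      if (PySem.Chars.lowerChar p = 'g' ∧ PySem.Chars.lowerChar c = 'g') ∨
         (PySem.Chars.lowerChar p = 'e' ∧ PySem.Chars.lowerChar c = 'r') then refB none rest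
      else if PySem.Chars.lowerChar c = 't' ∨ PySem.Chars.lowerChar c = 'i' then p :: refB none rest
      else if PySem.Chars.lowerChar c = 'g' ∨ PySem.Chars.lowerChar c = 'e' then p :: refB (some c) rest
      else p :: c :: refB none rest := by
  rw [refB]

-- the two-character slice A takes at index i, under i + 1 < len
theorem slice_two (cs : List Char) (i : Nat) (h : i + 1 < cs.length) :
    PySem.List.slice cs (some (i : Int)) (some ((i : Int) + 2)) = [cs[i], cs[i + 1]] := by
  have hc : ((i : Int) + 2) = ((i + 2 : Nat) : Int) := by push_cast; ring
  rw [hc, PySem.List.slice_natCast,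
    List.drop_eq_getElem_cons (by omega : i < cs.length),
    List.drop_eq_getElem_cons h, show i + 2 - i = 2 by omega,
    List.take_succ_cons, List.take_succ_cons, List.take_zero]

theorem tiggerfyGo_eq_refA (cs : List Char) (i : Nat) (result : List Char) :
    tiggerfyGo cs i result = result ++ refA (List.drop i cs) := by
  have key : ∀ (n i : Nat) (result : List Char), cs.length - i ≤ n →
      tiggerfyGo cs i result = result ++ refA (List.drop i cs) := by
    intro n
    induction n with
    | zero =>
      intro i result hn
      have hge : ¬ i < cs.length := by omega
      rw [tiggerfyGo, dif_neg hge, List.drop_eq_nil_of_le (by omega)]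
      simp [refA]
    | succ n ih =>
      intro i result hn
      by_cases h : i < cs.length
      · have hd : cs.drop i = cs[i] :: cs.drop (i + 1) := List.drop_eq_getElem_cons h
        rw [tiggerfyGo, dif_pos h]
        split_ifs with h1 h2 h3 h4
        · -- 't'
          rw [ih (i + 1) result (by omega), hd]
          cases hdr : cs.drop (i + 1) with
          | nil => simp [refA, h1]
          | cons c2 r2 => rw [refA_cons2, if_pos (Or.inl h1)]
        · -- 'i'
          rw [ih (i + 1) result (by omega), hd]
          cases hdr : cs.drop (i + 1) with
          | nil => simp [refA, h2]
          | cons c2 r2 => rw [refA_cons2, if_pos (Or.inr h2)]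
        · -- 'gg'
          obtain ⟨hlt, hs⟩ := h3
          rw [slice_two cs i hlt] at hs
          simp only [PySem.Chars.lower, List.map_cons, List.map_nil, List.cons.injEq,
            and_true] at hs
          have hd2 : cs.drop (i + 1) = cs[i + 1] :: cs.drop (i + 2) :=
            List.drop_eq_getElem_cons hlt
          rw [ih (i + 2) result (by omega), hd, hd2, refA_cons2,
            if_neg (by simp [hs.1]), if_pos (Or.inl ⟨hs.1, hs.2⟩)]
        · -- 'er'
          obtain ⟨hlt, hs⟩ := h4
          rw [slice_two cs i hlt] at hs
          simp only [PySem.Chars.lower, List.map_cons, List.map_nil, List.cons.injEq,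
            and_true] at hs
          have hd2 : cs.drop (i + 1) = cs[i + 1] :: cs.drop (i + 2) :=
            List.drop_eq_getElem_cons hlt
          rw [ih (i + 2) result (by omega), hd, hd2, refA_cons2,
            if_neg (by simp [hs.1]), if_pos (Or.inr ⟨hs.1, hs.2⟩)]
        · -- keep the character
          rw [ih (i + 1) (result ++ [cs[i]]) (by omega), hd]
          cases hdr : cs.drop (i + 1) with
          | nil => simp [refA, h1, h2]
          | cons c2 r2 =>
            have hlt : i + 1 < cs.length := by
              by_contra hge
              exact absurd hdr (by simp [List.drop_eq_nil_of_le (by omega : cs.length ≤ i + 1)])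
            have hd2 : cs.drop (i + 1) = cs[i + 1] :: cs.drop (i + 2) :=
              List.drop_eq_getElem_cons hlt
            have hc2 : c2 = cs[i + 1] := by rw [hdr] at hd2; exact (List.cons.injEq _ _ _ _ ▸ hd2).1
            have hng : ¬ ((PySem.Chars.lowerChar cs[i] = 'g' ∧ PySem.Chars.lowerChar c2 = 'g') ∨
                (PySem.Chars.lowerChar cs[i] = 'e' ∧ PySem.Chars.lowerChar c2 = 'r')) := by
              subst hc2
              rintro (⟨ha, hb⟩ | ⟨ha, hb⟩)
              · exact h3 ⟨hlt, by rw [slice_two cs i hlt]; simp [PySem.Chars.lower, ha, hb]⟩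
              · exact h4 ⟨hlt, by rw [slice_two cs i hlt]; simp [PySem.Chars.lower, ha, hb]⟩
            rw [refA_cons2, if_neg (by tauto), if_neg hng]
            simp
      · rw [tiggerfyGo, dif_neg h, List.drop_eq_nil_of_le (by omega)]
        simp [refA]
  exact key (cs.length - i) i result le_rfl

theorem foldl_altStep_eq_refB (l : List Char) (out : List Char) (pending : Option Char) :
    altFinish (l.foldl altStep (out, pending)) = out ++ refB pending l := by
  induction l generalizing out pending with
  | nil => cases pending <;> simp [altFinish, refB]
  | cons c rest ih =>
    cases pending with
    | none =>
      simp only [List.foldl_cons, altStep, refB]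
      split_ifs <;> simp [ih]
    | some p =>
      simp only [List.foldl_cons, altStep, refB]
      split_ifs <;> simp [ih]

theorem refB_eq_refA (n : Nat) :
    ∀ l : List Char, l.length ≤ n →
      refB none l = refA l ∧
      ∀ p : Char, (PySem.Chars.lowerChar p = 'g' ∨ PySem.Chars.lowerChar p = 'e') →
        refB (some p) l = refA (p :: l) := by
  induction n with
  | zero =>
    intro l hl
    have : l = [] := List.length_eq_zero_iff.mp (Nat.le_zero.mp hl)
    subst this
    refine ⟨by simp [refB, refA], fun p hp => ?_⟩
    have : ¬ (PySem.Chars.lowerChar p = 't' ∨ PySem.Chars.lowerChar p = 'i') := by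
      rcases hp with h | h <;> simp [h]
    simp [refB, refA, this]
  | succ n ih =>
    intro l hl
    cases l with
    | nil =>
      refine ⟨by simp [refB, refA], fun p hp => ?_⟩
      have : ¬ (PySem.Chars.lowerChar p = 't' ∨ PySem.Chars.lowerChar p = 'i') := by
        rcases hp with h | h <;> simp [h]
      simp [refB, refA, this]
    | cons c rest =>
      have hlenr : rest.length ≤ n := by simpa using Nat.lt_succ_iff.mp (by simpa using hl)
      have h1 : refB none (c :: rest) = refA (c :: rest) := by
        rw [refB_none_cons]
        cases rest with
        | nil =>
          split_ifs with ht hg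
          · simp [refA, ht, refB]
          · have : ¬ (PySem.Chars.lowerChar c = 't' ∨ PySem.Chars.lowerChar c = 'i') := ht
            rcases hg with h | h <;> simp [refB, refA, h]
          · simp [refA, ht, refB]
        | cons c2 rest2 =>
          rw [refA_cons2]
          split_ifs with ht hg hm hm
          · exact (ih _ hlenr).1
          · -- lowerChar c ∈ {g,e} and the pair (c,c2) matches gg/er
            rw [(ih _ hlenr).2 c hg, refA_cons2, if_neg (by tauto), if_pos hm]
          · rw [(ih _ hlenr).2 c hg, refA_cons2, if_neg (by tauto), if_neg hm]
          · -- lowerChar c ∉ {t,i,g,e}, so the gg/er test cannot hold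
            exact absurd hm (by rcases hm with ⟨h, _⟩ | ⟨h, _⟩ <;> exact absurd (Or.inl h) (by tauto))
          · rw [(ih _ hlenr).1]
      refine ⟨h1, fun p hp => ?_⟩
      have hpt : ¬ (PySem.Chars.lowerChar p = 't' ∨ PySem.Chars.lowerChar p = 'i') := by
        rcases hp with h | h <;> simp [h]
      rw [refB_some_cons, refA_cons2, if_neg hpt]
      by_cases hm : (PySem.Chars.lowerChar p = 'g' ∧ PySem.Chars.lowerChar c = 'g') ∨
          (PySem.Chars.lowerChar p = 'e' ∧ PySem.Chars.lowerChar c = 'r')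
      · rw [if_pos hm, if_pos hm]
        exact (ih _ hlenr).1
      · rw [if_neg hm, if_neg hm, ← h1, refB_none_cons]
        split_ifs <;> rfl

-- ===== VERDICT (by name: the statement is the Claim_ definition above) =====
theorem tiggerfy_spec : Claim_equal_tiggerfy := by
  intro word _
  unfold Spec_tiggerfy tiggerfy tiggerfy_alt
  rw [tiggerfyGo_eq_refA, foldl_altStep_eq_refB,
    (refB_eq_refA word.toList.length word.toList le_rfl).1]
  simp
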